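-- pv_equiv track=rewrite | github.com/envomp/2018-Introduction-to-Programming | tkk1/exam.py | repeated_word_numeration
-- ===== SOURCE A (Python) =====
-- def repeated_word_numeration(words):
--     """
--     For a given list of words, add numeration for every repeated word.
--
--     The input list consists of words. For every repeated element in the input list,
--     the output list adds a numeration after the words.
--     The format is as follows: #N, where N starts from 1.
--     Word comparison should be case-insensitive.
--     The case of symbols in a word itself in output list should remain the same as in input list.
--
--     The output list has the same amount of elements as the input list.
--     For every repeated element in the output list, "#N" is added, where N = 1, 2, 3, ...
--
--     word_numeration(["tere", "tere", "tulemast"]) => ["tere#1", "tere#2", "tulemast"]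
--     word_numeration(["Tere", "tere", "tulemast"]) => ["Tere#1", "tere#2", "tulemast"]
--     word_numeration(["Tere", "tere", "tulemast", "no", "tere", "TERE"]) => ["Tere#1", "tere#2", "tulemast", "no", "tere#3", "TERE#4"]
--
--     :param words: A list of strings.
--     :return: List of words where repeated words have numeration.
--     """
--     temp = []
--     out = []
--
--     lowered = [word.lower() for word in words]
--
--     for i in words:
--         temp.append(i.lower())
--         order = temp.count(i.lower())
--         is_multiple = lowered.count(i.lower())
--
--         if is_multiple == 1:
--             out.append(i)
--         else:
--             out.append(i + "#" + str(order))
--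
--     return out
-- ===== SOURCE B (Python) =====
-- def repeated_word_numeration(words):
--     # Index-table algorithm: group positions by lowercased word, then number
--     # each multi-occurrence group in one group-shaped pass; O(n) vs A's O(n^2).
--     groups = {}
--     for i, w in enumerate(words):
--         groups.setdefault(w.lower(), []).append(i)
--     numbered = {}
--     for idxs in groups.values():
--         if len(idxs) > 1:
--             for n, i in enumerate(idxs, 1):
--                 numbered[i] = words[i] + "#" + str(n)
--     return [numbered.get(i, w) for i, w in enumerate(words)]
-- ===== Notes on version B (the rewrite author's own statement) =====
-- stated objective: faster
-- what changed: Replaces A's per-element repeated full-list and prefix count scans with an index table mapping each lowercased word to its positions, a numbering pass over the multi-occurrence groups, and a final per-index lookup.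
import Mathlib
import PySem

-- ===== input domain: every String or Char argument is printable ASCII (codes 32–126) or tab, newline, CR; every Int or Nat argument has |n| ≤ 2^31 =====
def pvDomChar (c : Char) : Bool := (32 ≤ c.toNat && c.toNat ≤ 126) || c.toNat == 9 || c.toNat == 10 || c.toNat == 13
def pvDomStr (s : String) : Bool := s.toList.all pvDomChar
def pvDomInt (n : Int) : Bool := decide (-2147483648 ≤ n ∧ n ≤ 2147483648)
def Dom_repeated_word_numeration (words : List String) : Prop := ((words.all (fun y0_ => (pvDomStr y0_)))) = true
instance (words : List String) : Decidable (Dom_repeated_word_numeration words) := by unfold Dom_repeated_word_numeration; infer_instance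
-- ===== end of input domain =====

-- B replaces A's per-element repeated count scans by an index table grouping positions per
-- lowercased word, a numbering pass over the multi-occurrence groups, and a final lookup map (faster).

-- ===== PORT A =====
def repeated_word_numeration (words : List String) : List String :=
  let lowered := words.map (fun word => PySem.Str.lower word)
  (words.foldl (fun (st : List String × List String) i =>
      let temp := st.1 ++ [PySem.Str.lower i]
      let order : Int := (PySem.List.count temp (PySem.Str.lower i) : Int)
      let is_multiple : Int := (PySem.List.count lowered (PySem.Str.lower i) : Int)
      if is_multiple = 1 then (temp, st.2 ++ [i])
      else (temp, st.2 ++ [i ++ "#" ++ PySem.Int.toStr order])) ([], [])).2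

-- ===== PORT B =====
-- 'words[i]' in the numbering pass is ported as pyGetD: every index i comes from
-- enumerate(words), so it is in range and Python's words[i] never raises — exact here.
def repeated_word_numeration_alt (words : List String) : List String :=
  let groups := (PySem.List.enumerate words 0).foldl
      (fun (d : PySem.Dict String (List Int)) p =>
        d.modify (PySem.Str.lower p.2) [] (fun v => v ++ [p.1]))
      PySem.Dict.empty
  let numbered := (PySem.Dict.values groups).foldl
      (fun (d : PySem.Dict Int String) idxs =>
        if (1 : Int) < (idxs.length : Int) then
          (PySem.List.enumerate idxs 1).foldl
            (fun d q => d.insert q.2 (PySem.List.pyGetD words q.2 "" ++ "#" ++ PySem.Int.toStr q.1)) d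
        else d)
      PySem.Dict.empty
  (PySem.List.enumerate words 0).map (fun p => PySem.Dict.getD numbered p.1 p.2)

-- ===== PRECONDITION & SPEC =====
def Spec_repeated_word_numeration (words : List String) (out : List String) : Prop := out = repeated_word_numeration_alt words
instance (words : List String) (out : List String) : Decidable (Spec_repeated_word_numeration words out) := by unfold Spec_repeated_word_numeration; infer_instance

-- ===== CLAIM (what is proved, stated in full; the proofs are below) =====
def Claim_equal_repeated_word_numeration : Prop := ∀ (words : List String), Dom_repeated_word_numeration words → Spec_repeated_word_numeration words (repeated_word_numeration words)

-- ===== LEMMAS AND PROOFS =====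

-- the common index-wise description both programs are reduced to
def pvLowered (words : List String) : List String := words.map PySem.Str.lower

def pvNum (words : List String) (j : Nat) : String :=
  words.getD j "" ++ "#" ++
    PySem.Int.toStr ((((pvLowered words).take (j+1)).count ((pvLowered words).getD j "") : Nat) : Int)

def pvEmit (words : List String) (j : Nat) : String :=
  if (pvLowered words).count ((pvLowered words).getD j "") = 1 then words.getD j ""
  else pvNum words j

def pvSpecList (words : List String) : List String :=
  (List.range words.length).map (pvEmit words)

lemma pv_getD_eq (words : List String) (j : Nat) (hj : j < words.length) :
    words.getD j "" = words[j] := by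
  rw [List.getD_eq_getElem?_getD, List.getElem?_eq_getElem hj]; rfl

-- ascending list of positions of lowercased word l
def pvPosns (words : List String) (l : String) : List Int :=
  ((PySem.List.enumerate words 0).filter (fun p => PySem.Str.lower p.2 == l)).map (·.1)

lemma pvLowered_getD (words : List String) (j : Nat) (hj : j < words.length) :
    (pvLowered words).getD j "" = PySem.Str.lower (words.getD j "") := by
  unfold pvLowered
  rw [List.getD_eq_getElem?_getD, List.getD_eq_getElem?_getD]
  simp [List.getElem?_eq_getElem (by simpa using hj : j < (words.map PySem.Str.lower).length),
        List.getElem?_eq_getElem hj]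

-- ===== A-side =====

lemma pvA_loop (words : List String) :
    ∀ (rest p acc : List String), p ++ rest = words →
    (rest.foldl (fun (st : List String × List String) i =>
        let temp := st.1 ++ [PySem.Str.lower i]
        let order : Int := (PySem.List.count temp (PySem.Str.lower i) : Int)
        let is_multiple : Int := (PySem.List.count (pvLowered words) (PySem.Str.lower i) : Int)
        if is_multiple = 1 then (temp, st.2 ++ [i])
        else (temp, st.2 ++ [i ++ "#" ++ PySem.Int.toStr order])) (p.map PySem.Str.lower, acc)).2
      = acc ++ (List.range rest.length).map (fun j => pvEmit words (p.length + j)) := by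
  intro rest
  induction rest with
  | nil => intro p acc _; simp
  | cons w rest ih =>
    intro p acc hpw
    have hplt : p.length < words.length := by
      rw [← hpw]; simp
    have hw : words.getD p.length "" = w := by
      have hsome : words[p.length]? = some w := by
        rw [← hpw, List.getElem?_append_right (le_refl p.length)]
        simp
      rw [List.getD_eq_getElem?_getD, hsome]
      rfl
    have hlw : (pvLowered words).getD p.length "" = PySem.Str.lower w := by
      rw [pvLowered_getD words p.length hplt, hw]
    have htake : (pvLowered words).take (p.length + 1) = p.map PySem.Str.lower ++ [PySem.Str.lower w] := by
      unfold pvLowered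
      rw [← hpw, List.map_append, List.map_cons]
      rw [show p.length + 1 = (p.map PySem.Str.lower).length + 1 from by simp]
      rw [List.take_append]
      simp
    have hemit : pvEmit words (p.length + 0) =
        (if ((PySem.List.count (pvLowered words) (PySem.Str.lower w) : Nat) : Int) = 1 then w
         else w ++ "#" ++ PySem.Int.toStr
            ((PySem.List.count (p.map PySem.Str.lower ++ [PySem.Str.lower w]) (PySem.Str.lower w) : Nat) : Int)) := by
      unfold pvEmit pvNum
      rw [Nat.add_zero, hlw, hw, htake]
      by_cases h1 : (pvLowered words).count (PySem.Str.lower w) = 1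
      · rw [if_pos h1, if_pos (by exact_mod_cast h1)]
      · rw [if_neg h1, if_neg (by exact_mod_cast h1)]
        rw [PySem.List.count_eq]
    rw [List.foldl_cons]
    simp only []
    by_cases hcond : ((PySem.List.count (pvLowered words) (PySem.Str.lower w) : Nat) : Int) = 1
    · rw [if_pos hcond]
      rw [show p.map PySem.Str.lower ++ [PySem.Str.lower w] = (p ++ [w]).map PySem.Str.lower from by simp]
      rw [ih (p ++ [w]) (acc ++ [w]) (by rw [← hpw]; simp)]
      simp only [List.length_cons]
      rw [List.range_succ_eq_map, List.map_cons, List.map_map]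
      simp only [List.append_assoc, List.singleton_append]
      congr 2
      · rw [hemit, if_pos hcond]
      · apply List.map_congr_left
        intro j _
        simp only [Function.comp_apply]
        congr 1
        simp only [List.length_append, List.length_cons, List.length_nil]
        omega
    · rw [if_neg hcond]
      rw [show p.map PySem.Str.lower ++ [PySem.Str.lower w] = (p ++ [w]).map PySem.Str.lower from by simp]
      rw [ih (p ++ [w]) _ (by rw [← hpw]; simp)]
      simp only [List.length_cons]
      rw [List.range_succ_eq_map, List.map_cons, List.map_map]
      simp only [List.append_assoc, List.singleton_append]
      congr 2
      · rw [hemit, if_neg hcond]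
        simp [PySem.List.count_eq]
      · apply List.map_congr_left
        intro j _
        simp only [Function.comp_apply]
        congr 1
        simp only [List.length_append, List.length_cons, List.length_nil]
        omega

lemma pvA_eq_spec (words : List String) : repeated_word_numeration words = pvSpecList words := by
  unfold repeated_word_numeration
  dsimp only
  have := pvA_loop words words [] [] (by simp)
  simp only [List.map_nil, List.length_nil, List.nil_append, Nat.zero_add] at this
  unfold pvSpecList
  exact this

-- ===== B-side =====

lemma pv_get?_foldl_insert_not_mem {α : Type} (key : α → Int) (val : α → String) :
    ∀ (ps : List α) (d : PySem.Dict Int String) (k : Int), k ∉ ps.map key →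
    (ps.foldl (fun d q => d.insert (key q) (val q)) d).get? k = d.get? k := by
  intro ps
  induction ps with
  | nil => intro d k h; rfl
  | cons q ps ih =>
    intro d k h
    simp only [List.map_cons, List.mem_cons, not_or] at h
    rw [List.foldl_cons, ih _ _ h.2, PySem.Dict.get?_insert_of_ne _ _ h.1]

lemma pv_get?_foldl_insert {α : Type} (key : α → Int) (val : α → String) :
    ∀ (ps : List α) (d : PySem.Dict Int String) (k : Int), (ps.map key).Nodup →
    (ps.foldl (fun d q => d.insert (key q) (val q)) d).get? k =
      (match ps.find? (fun q => key q == k) with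
       | some q => some (val q)
       | none => d.get? k) := by
  intro ps
  induction ps with
  | nil => intro d k _; rfl
  | cons q ps ih =>
    intro d k h
    simp only [List.map_cons, List.nodup_cons] at h
    rw [List.foldl_cons, List.find?_cons]
    by_cases hk : key q = k
    · subst hk
      simp only [BEq.rfl]
      rw [pv_get?_foldl_insert_not_mem key val ps _ _ h.1, PySem.Dict.get?_insert_self]
    · have : (key q == k) = false := by simpa using hk
      rw [this, ih _ _ h.2, PySem.Dict.get?_insert_of_ne _ _ (fun e => hk e.symm)]

lemma pv_find?_enumerate_eq (idxs : List Int) :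
    ∀ (s : Int) (k : Nat) (i : Int), idxs.Nodup → idxs[k]? = some i →
    (PySem.List.enumerate idxs s).find? (fun q => q.2 == i) = some (s + (k : Int), i) := by
  induction idxs with
  | nil => intro s k i _ h; simp at h
  | cons x t ih =>
    intro s k i hnd h
    rw [PySem.List.enumerate_cons, List.find?_cons]
    rw [List.nodup_cons] at hnd
    cases k with
    | zero =>
      simp only [List.getElem?_cons_zero, Option.some_inj] at h
      subst h
      simp
    | succ k =>
      simp only [List.getElem?_cons_succ] at h
      have hxi : x ≠ i := fun e => hnd.1 (e ▸ List.mem_of_getElem? h)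
      have hb : (((s, x) : Int × Int).2 == i) = false := by simpa using hxi
      rw [hb, ih (s+1) k i hnd.2 h]
      have : s + 1 + (k : Int) = s + ((k+1 : Nat) : Int) := by push_cast; ring
      rw [this]

lemma pv_find?_enumerate_none (idxs : List Int) (s i : Int) (h : i ∉ idxs) :
    (PySem.List.enumerate idxs s).find? (fun q => q.2 == i) = none := by
  rw [List.find?_eq_none]
  intro q hq
  have hmem : q.2 ∈ idxs := by
    have := congrArg (fun l => q.2 ∈ l) (PySem.List.map_snd_enumerate idxs s)
    simp only [eq_iff_iff] at this
    exact this.mp (List.mem_map_of_mem hq)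
  simp only [beq_iff_eq]
  intro e
  exact h (e ▸ hmem)

lemma pv_posns_aux (l : String) :
    ∀ (ws : List String) (s : Int) (k : Nat) (i : Int),
    ((((PySem.List.enumerate ws s).filter (fun p => PySem.Str.lower p.2 == l)).map (·.1))[k]? = some i) →
    ∃ j : Nat, j < ws.length ∧ i = s + (j : Int) ∧ PySem.Str.lower (ws.getD j "") = l ∧
      ((ws.take (j+1)).map PySem.Str.lower).count l = k + 1 := by
  intro ws
  induction ws with
  | nil => intro s k i h; simp [PySem.List.enumerate_nil] at h
  | cons w ws ih =>
    intro s k i h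
    rw [PySem.List.enumerate_cons, List.filter_cons] at h
    by_cases hl : PySem.Str.lower w = l
    · have hb : (PySem.Str.lower ((s, w) : Int × String).2 == l) = true := by simpa using hl
      rw [hb] at h
      simp only [if_true, List.map_cons] at h
      cases k with
      | zero =>
        simp only [List.getElem?_cons_zero, Option.some_inj] at h
        exact ⟨0, Nat.succ_pos _, by rw [← h]; simp, by simpa using hl, by simp [hl]⟩
      | succ k =>
        simp only [List.getElem?_cons_succ] at h
        obtain ⟨j, hjlt, hi, hlow, hcnt⟩ := ih (s+1) k i h
        refine ⟨j+1, by simpa using Nat.succ_lt_succ hjlt, by rw [hi]; push_cast; ring, by simpa using hlow, ?_⟩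
        simp only [List.take_succ_cons, List.map_cons, List.count_cons, hcnt]
        simp [hl]
    · have hb : (PySem.Str.lower ((s, w) : Int × String).2 == l) = false := by simpa using hl
      rw [hb] at h
      simp only [Bool.false_eq_true, if_false] at h
      obtain ⟨j, hjlt, hi, hlow, hcnt⟩ := ih (s+1) k i h
      refine ⟨j+1, by simpa using Nat.succ_lt_succ hjlt, by rw [hi]; push_cast; ring, by simpa using hlow, ?_⟩
      simp only [List.take_succ_cons, List.map_cons, List.count_cons, hcnt]
      simp [hl]

lemma pv_mem_posns (words : List String) (j : Nat) (hj : j < words.length) :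
    (j : Int) ∈ pvPosns words (PySem.Str.lower (words.getD j "")) := by
  unfold pvPosns
  refine List.mem_map.mpr ⟨((j : Int), words[j]), List.mem_filter.mpr ⟨?_, ?_⟩, rfl⟩
  · exact (PySem.List.mem_enumerate_iff _ _ _).mpr ⟨j, hj, by simp⟩
  · simp [List.getD_eq_getElem?_getD, List.getElem?_eq_getElem hj]

lemma pv_mem_posns_lower (words : List String) (l : String) (i : Int) (h : i ∈ pvPosns words l) :
    ∃ j : Nat, i = (j : Int) ∧ j < words.length ∧ PySem.Str.lower (words.getD j "") = l := by
  unfold pvPosns at h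
  obtain ⟨p, hp, hpi⟩ := List.mem_map.mp h
  obtain ⟨hpe, hpl⟩ := List.mem_filter.mp hp
  obtain ⟨k, hk, hpk⟩ := (PySem.List.mem_enumerate_iff _ _ _).mp hpe
  subst hpk
  refine ⟨k, by simpa using hpi.symm, hk, ?_⟩
  rw [pv_getD_eq words k hk]
  simpa using hpl

lemma pv_posns_length (words : List String) (l : String) :
    (pvPosns words l).length = (pvLowered words).count l := by
  unfold pvPosns pvLowered
  rw [List.length_map, ← List.countP_eq_length_filter]
  rw [List.count, List.countP_map]
  conv_rhs => rw [← PySem.List.map_snd_enumerate words (0 : Int)]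
  rw [List.countP_map]
  rfl

lemma pv_posns_nodup (words : List String) (l : String) : (pvPosns words l).Nodup := by
  unfold pvPosns
  have h1 := PySem.List.pairwise_lt_enumerate words (0 : Int)
  have h2 := h1.filter (fun p => PySem.Str.lower p.2 == l)
  have h3 := h2.map (f := fun p : Int × String => p.1) (S := fun a b => a ≠ b)
    (fun a b hab => ne_of_lt hab)
  exact h3

lemma pv_get?_group (words : List String) (l : String) (d : PySem.Dict Int String)
    (j : Nat) (hj : j < words.length) :
    ((if (1 : Int) < ((pvPosns words l).length : Int) then
        (PySem.List.enumerate (pvPosns words l) 1).foldl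
          (fun d q => d.insert q.2 (PySem.List.pyGetD words q.2 "" ++ "#" ++ PySem.Int.toStr q.1)) d
      else d).get? (j : Int)) =
      if PySem.Str.lower (words.getD j "") = l ∧ 2 ≤ (pvLowered words).count l
      then some (pvNum words j) else d.get? (j : Int) := by
  have hlen := pv_posns_length words l
  have hnd : ((PySem.List.enumerate (pvPosns words l) 1).map (fun q : Int × Int => q.2)).Nodup := by
    rw [PySem.List.map_snd_enumerate]; exact pv_posns_nodup words l
  by_cases hml : 2 ≤ (pvLowered words).count l
  · have hc : (1 : Int) < ((pvPosns words l).length : Int) := by rw [hlen]; exact_mod_cast hml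
    rw [if_pos hc]
    rw [pv_get?_foldl_insert (fun q : Int × Int => q.2)
        (fun q : Int × Int => PySem.List.pyGetD words q.2 "" ++ "#" ++ PySem.Int.toStr q.1)
        _ d _ hnd]
    by_cases hlj : PySem.Str.lower (words.getD j "") = l
    · have hmem : (j : Int) ∈ pvPosns words l := hlj ▸ pv_mem_posns words j hj
      obtain ⟨k, hk⟩ := List.getElem?_of_mem hmem
      rw [pv_find?_enumerate_eq (pvPosns words l) 1 k (j : Int) (pv_posns_nodup words l) hk]
      rw [if_pos ⟨hlj, hml⟩]
      obtain ⟨j', hj'lt, hj'eq, hlow', hcnt⟩ := pv_posns_aux l words 0 k (j : Int) hk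
      have hjj : j' = j := by
        have : (j : Int) = (j' : Int) := by rw [hj'eq]; ring
        exact_mod_cast this.symm
      rw [hjj] at hcnt
      unfold pvNum
      refine Eq.trans (b := some (PySem.List.pyGetD words (j : Int) "" ++ "#" ++
        PySem.Int.toStr (1 + (k : Int)))) rfl ?_
      have h1 : PySem.List.pyGetD words (j : Int) "" = words.getD j "" := by
        simp
      have h2 : (pvLowered words).take (j+1) = (words.take (j+1)).map PySem.Str.lower := by
        unfold pvLowered; rw [List.map_take]
      rw [h1, h2, pvLowered_getD words j hj, hlj, hcnt]
      have h3 : (1 : Int) + (k : Int) = ((k + 1 : Nat) : Int) := by push_cast; ring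
      rw [h3]
    · have hnotmem : (j : Int) ∉ pvPosns words l := by
        intro hm
        obtain ⟨j', e, _, hl'⟩ := pv_mem_posns_lower words l _ hm
        have : j' = j := by exact_mod_cast e.symm
        exact hlj (this ▸ hl')
      rw [pv_find?_enumerate_none _ _ _ hnotmem, if_neg (fun hc2 => hlj hc2.1)]
  · have hc : ¬ ((1 : Int) < ((pvPosns words l).length : Int)) := by rw [hlen]; omega
    rw [if_neg hc, if_neg (fun hc2 => hml hc2.2)]

lemma pv_outer (words : List String) (j : Nat) (hj : j < words.length) :
    ∀ (ks : List String) (d : PySem.Dict Int String),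
    ((ks.foldl (fun d l =>
        if (1 : Int) < ((pvPosns words l).length : Int) then
          (PySem.List.enumerate (pvPosns words l) 1).foldl
            (fun d q => d.insert q.2 (PySem.List.pyGetD words q.2 "" ++ "#" ++ PySem.Int.toStr q.1)) d
        else d) d).get? (j : Int)) =
      if PySem.Str.lower (words.getD j "") ∈ ks ∧
         2 ≤ (pvLowered words).count (PySem.Str.lower (words.getD j ""))
      then some (pvNum words j) else d.get? (j : Int) := by
  intro ks
  induction ks with
  | nil => intro d; simp
  | cons l ks ih =>
    intro d
    rw [List.foldl_cons, ih]
    rw [pv_get?_group words l d j hj]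
    by_cases hc2 : 2 ≤ (pvLowered words).count (PySem.Str.lower (words.getD j ""))
    · by_cases hks : PySem.Str.lower (words.getD j "") ∈ ks
      · rw [if_pos ⟨hks, hc2⟩, if_pos ⟨List.mem_cons_of_mem _ hks, hc2⟩]
      · rw [if_neg (fun h => hks h.1)]
        by_cases hl : PySem.Str.lower (words.getD j "") = l
        · rw [if_pos ⟨hl, by rw [← hl]; exact hc2⟩, if_pos ⟨List.mem_cons.mpr (Or.inl hl), hc2⟩]
        · rw [if_neg (fun h => hl h.1),
              if_neg (fun h => (List.mem_cons.mp h.1).elim hl hks)]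
    · rw [if_neg (fun h => hc2 h.2),
          if_neg (fun h : PySem.Str.lower (words.getD j "") = l ∧
              2 ≤ (pvLowered words).count l => hc2 (by rw [h.1]; exact h.2)),
          if_neg (fun h => hc2 h.2)]

lemma pv_groups_getD (words : List String) (l : String) :
    ((PySem.List.enumerate words 0).foldl
      (fun (d : PySem.Dict String (List Int)) p =>
        d.modify (PySem.Str.lower p.2) [] (fun v => v ++ [p.1]))
      PySem.Dict.empty).getD l [] = pvPosns words l := by
  rw [show (PySem.List.enumerate words 0).foldl
      (fun (d : PySem.Dict String (List Int)) p =>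
        d.modify (PySem.Str.lower p.2) [] (fun v => v ++ [p.1])) PySem.Dict.empty
    = ((PySem.List.enumerate words 0).map (fun p => (PySem.Str.lower p.2, p.1))).foldl
      (fun (d : PySem.Dict String (List Int)) p =>
        d.modify p.1 [] (fun v => v ++ [p.2])) PySem.Dict.empty from by rw [List.foldl_map]]
  rw [PySem.Dict.getD_foldl_modify_append]
  rw [List.filter_map, List.map_map]
  simp only [PySem.Dict.getD_empty, List.nil_append]
  rfl

lemma pvB_eq_spec (words : List String) : repeated_word_numeration_alt words = pvSpecList words := by
  unfold repeated_word_numeration_alt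
  dsimp only
  have hnd : ((PySem.List.enumerate words 0).foldl
      (fun (d : PySem.Dict String (List Int)) p =>
        d.modify (PySem.Str.lower p.2) [] (fun v => v ++ [p.1]))
      PySem.Dict.empty).keys.Nodup :=
    PySem.Dict.nodup_keys_foldl_modify_key _ _ _ _ _ PySem.Dict.nodup_keys_empty
  have hkeys : ((PySem.List.enumerate words 0).foldl
      (fun (d : PySem.Dict String (List Int)) p =>
        d.modify (PySem.Str.lower p.2) [] (fun v => v ++ [p.1]))
      PySem.Dict.empty).keys = PySem.Set.ofList (pvLowered words) := by
    rw [PySem.Dict.keys_foldl_modify_key]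
    rw [PySem.Dict.keys_empty]
    rw [show (PySem.List.enumerate words 0).map (fun p => PySem.Str.lower p.2) = pvLowered words from by
      rw [show (fun p : Int × String => PySem.Str.lower p.2) =
          (PySem.Str.lower ∘ (fun p : Int × String => p.2)) from rfl,
        ← List.map_map, PySem.List.map_snd_enumerate]
      rfl]
    rfl
  rw [PySem.Dict.values_eq_map_keys _ hnd [], List.foldl_map, hkeys]
  simp only [pv_groups_getD]
  apply List.ext_getElem
  · simp [pvSpecList]
  · intro k h1 h2
    simp only [List.getElem_map, PySem.List.getElem_enumerate]
    have hk : k < words.length := by simpa using h1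
    unfold pvSpecList
    rw [List.getElem_map, List.getElem_range]
    rw [show ((0 : Int) + (k : Int)) = (k : Int) from by ring]
    rw [PySem.Dict.getD_eq_get?_getD]
    rw [pv_outer words k hk (PySem.Set.ofList (pvLowered words)) PySem.Dict.empty]
    have hmemlow : PySem.Str.lower (words.getD k "") ∈ pvLowered words := by
      unfold pvLowered
      exact List.mem_map.mpr ⟨words[k], List.getElem_mem _, by rw [pv_getD_eq words k hk]⟩
    have hmeml : PySem.Str.lower (words.getD k "") ∈ PySem.Set.ofList (pvLowered words) := by
      rw [PySem.Set.mem_ofList]; exact hmemlow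
    have hcpos : 0 < (pvLowered words).count (PySem.Str.lower (words.getD k "")) :=
      List.count_pos_iff.mpr hmemlow
    unfold pvEmit
    rw [pvLowered_getD words k hk]
    by_cases hc : 2 ≤ (pvLowered words).count (PySem.Str.lower (words.getD k ""))
    · rw [if_pos ⟨hmeml, hc⟩]
      simp only [Option.getD_some]
      rw [if_neg (by omega)]
    · rw [if_neg (fun h => hc h.2)]
      simp only [PySem.Dict.get?_empty, Option.getD_none]
      rw [if_pos (by omega)]
      exact (pv_getD_eq words k hk).symm

-- ===== VERDICT (by name: the statement is the Claim_ definition above) =====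
theorem repeated_word_numeration_spec : Claim_equal_repeated_word_numeration := by
  intro words _
  unfold Spec_repeated_word_numeration
  rw [pvA_eq_spec, pvB_eq_spec]
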